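-- pv_equiv track=rewrite | github.com/hvantoan/TreasureHunter | auto-play/src/utils/auto_logic.py | find_nearly_distance
-- ===== SOURCE A (Python) =====
-- def find_nearly_distance(coordinates):
--     min_coordinate: dict = {}
--     if len(coordinates) > 0:
--         min_distance = coordinates[0]['distance']
--         min_coordinate = coordinates[0]
--         for coordinate in coordinates:
--             if coordinate['distance'] < min_distance:
--                 min_distance = coordinate['distance']
--                 min_coordinate = coordinate
--     return min_coordinate
-- ===== SOURCE B (Python) =====
-- def find_nearly_distance(coordinates):
--     if not coordinates:
--         return {}
--     return sorted(coordinates, key=lambda c: c['distance'])[0]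
-- ===== Notes on version B (the rewrite author's own statement) =====
-- stated objective: alternative
-- what changed: Replaces the running-minimum scan with a stable sort by distance followed by taking the front element; stability makes ties resolve to the first occurrence, like A's strict <.
import Mathlib
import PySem

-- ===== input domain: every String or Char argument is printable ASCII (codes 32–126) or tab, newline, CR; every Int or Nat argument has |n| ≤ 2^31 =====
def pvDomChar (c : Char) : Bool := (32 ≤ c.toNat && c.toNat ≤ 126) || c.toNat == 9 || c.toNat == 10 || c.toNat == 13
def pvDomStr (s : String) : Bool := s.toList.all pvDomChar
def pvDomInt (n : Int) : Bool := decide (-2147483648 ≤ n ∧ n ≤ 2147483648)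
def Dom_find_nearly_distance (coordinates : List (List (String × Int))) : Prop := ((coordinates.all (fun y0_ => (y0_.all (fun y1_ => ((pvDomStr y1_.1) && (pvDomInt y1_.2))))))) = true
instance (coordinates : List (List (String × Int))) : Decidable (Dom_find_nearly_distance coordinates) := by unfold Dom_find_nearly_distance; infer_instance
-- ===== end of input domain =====

-- B sorts stably by distance and takes the front element instead of A's running-minimum scan (alternative decomposition, not faster).


-- ===== PORT A =====
-- c['distance'] raises KeyError when missing; Pre_ guarantees the key is present, so getD is exact there.
def find_nearly_distance (coordinates : List (List (String × Int))) : List (String × Int) :=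
  match coordinates with
  | [] => []                            -- min_coordinate stays {}
  | c0 :: _ =>
      (coordinates.foldl
        (fun (st : Int × List (String × Int)) coordinate =>
          if PySem.Dict.getD ⟨coordinate⟩ "distance" 0 < st.1 then
            (PySem.Dict.getD ⟨coordinate⟩ "distance" 0, coordinate)
          else st)
        (PySem.Dict.getD ⟨c0⟩ "distance" 0, c0)).2

-- ===== PORT B =====
-- if not coordinates: return {}; return sorted(coordinates, key=lambda c: c['distance'])[0]
-- the key lookup is exact under Pre_; [0] on the nonempty sorted list is its head.
def find_nearly_distance_alt (coordinates : List (List (String × Int))) : List (String × Int) :=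
  match coordinates with
  | [] => []
  | _ :: _ =>
      (PySem.List.sorted coordinates (fun c => PySem.Dict.getD ⟨c⟩ "distance" 0) false).headD []

-- ===== PRECONDITION & SPEC =====
-- Pre_ excludes exactly the inputs where A raises KeyError: a coordinate without a 'distance' key.
def Pre_find_nearly_distance (coordinates : List (List (String × Int))) : Prop :=
  (coordinates.all (fun c => (PySem.Dict.get? ⟨c⟩ "distance").isSome)) = true
instance (coordinates : List (List (String × Int))) : Decidable (Pre_find_nearly_distance coordinates) := by unfold Pre_find_nearly_distance; infer_instance
def pvWitness_find_nearly_distance : (List (List (String × Int))) := [[("distance", 3)], [("distance", 1), ("id", 7)]]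
def Spec_find_nearly_distance (coordinates : List (List (String × Int))) (out : List (String × Int)) : Prop := out = find_nearly_distance_alt coordinates
instance (coordinates : List (List (String × Int))) (out : List (String × Int)) : Decidable (Spec_find_nearly_distance coordinates out) := by unfold Spec_find_nearly_distance; infer_instance

-- ===== CLAIM (what is proved, stated in full; the proofs are below) =====
def Claim_equal_find_nearly_distance : Prop := ∀ (coordinates : List (List (String × Int))), Dom_find_nearly_distance coordinates → Pre_find_nearly_distance coordinates → Spec_find_nearly_distance coordinates (find_nearly_distance coordinates)

-- ===== LEMMAS AND PROOFS =====

-- Head of the insertion-sort accumulator tracks A's running strict-minimum: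
-- inserting x into a nonempty accumulator replaces the head iff key x < key head.
theorem pv_head_foldl_insertBy (key : List (String × Int) → Int)
    (t : List (List (String × Int))) :
    ∀ (m : List (String × Int)) (rest : List (List (String × Int))),
      ((t.foldl (fun acc x => PySem.List.insertBy (fun a b => decide (key a < key b)) x acc)
          (m :: rest)).headD [])
      = (t.foldl
          (fun (st : Int × List (String × Int)) c =>
            if key c < st.1 then (key c, c) else st)
          (key m, m)).2 := by
  induction t with
  | nil => intro m rest; simp
  | cons x t ih =>
      intro m rest
      by_cases h : key x < key m
      · simp only [List.foldl_cons, PySem.List.insertBy, decide_eq_true h, if_pos h]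
        exact ih x (m :: rest)
      · simp only [List.foldl_cons, PySem.List.insertBy, decide_eq_false h, if_neg h]
        exact ih m _

theorem find_nearly_distance_eq (coordinates : List (List (String × Int))) :
    find_nearly_distance coordinates = find_nearly_distance_alt coordinates := by
  cases coordinates with
  | nil => rfl
  | cons c0 t =>
      unfold find_nearly_distance find_nearly_distance_alt
      rw [PySem.List.sorted_eq_foldl_insertBy]
      simp only [List.foldl_cons, if_neg (lt_irrefl _)]
      exact (pv_head_foldl_insertBy (fun c => PySem.Dict.getD ⟨c⟩ "distance" 0) t c0 []).symm

-- ===== VERDICT (by name: the statement is the Claim_ definition above) =====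
theorem find_nearly_distance_spec : Claim_equal_find_nearly_distance := by
  intro coordinates _ _
  exact find_nearly_distance_eq coordinates
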